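-- pv_equiv track=rewrite | github.com/QT-HH/Algorithm | TEST/통합공채/TEST04.py | minX
-- ===== SOURCE A (Python) =====
-- def minX(arr):
--     tmp = []
--     tot = 0
--
--     for i in arr:
--         tot+=i
--         tmp.append(tot)
--
--     x = 1-min(tmp)
--
--     return x
-- ===== SOURCE B (Python) =====
-- def minX(arr):
--     # Right-to-left scan: best is the minimum nonempty-prefix sum of the
--     # suffix seen so far, via the recurrence minpref(x::rest) = min(x, x + minpref(rest)).
--     # No running total and no prefix-sum list are kept.
--     best = None
--     for x in reversed(arr):
--         best = x if best is None else min(x, x + best)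
--     if best is None:
--         raise ValueError("min() arg is an empty sequence")
--     return 1 - best
-- ===== Notes on version B (the rewrite author's own statement) =====
-- stated objective: alternative
-- what changed: B scans the list right-to-left using the recurrence minpref(x::rest) = min(x, x + minpref(rest)), so it keeps neither a running prefix total nor the prefix-sum list that A builds and scans with min().
import Mathlib
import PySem

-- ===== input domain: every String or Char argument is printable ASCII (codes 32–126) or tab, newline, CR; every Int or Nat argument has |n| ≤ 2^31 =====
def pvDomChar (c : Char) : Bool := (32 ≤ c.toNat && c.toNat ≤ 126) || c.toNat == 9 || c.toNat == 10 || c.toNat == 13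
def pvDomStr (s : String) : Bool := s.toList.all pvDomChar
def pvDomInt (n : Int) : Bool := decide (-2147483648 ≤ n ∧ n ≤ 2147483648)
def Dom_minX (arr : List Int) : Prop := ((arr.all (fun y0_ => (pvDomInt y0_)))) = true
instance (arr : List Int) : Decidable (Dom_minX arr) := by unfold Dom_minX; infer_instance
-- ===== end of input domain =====

-- B replaces A's prefix-sum list + min() scan by a right-to-left recurrence with no running total.

-- ===== PORT A =====
-- builds the prefix-sum list tmp left to right, then 1 - min(tmp); min([]) raises → excluded by Pre_
def minX (arr : List Int) : Int :=
  let st := arr.foldl (fun (st : List Int × Int) i =>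
    let tot := st.2 + i
    (st.1 ++ [tot], tot)) ([], 0)
  match PySem.List.min? st.1 (fun x => x) with
  | some m => 1 - m
  | none => 0  -- unreachable under Pre_minX (Python raises ValueError here)

-- ===== PORT B =====
-- right-to-left scan ('for x in reversed(arr)' = foldr): best = min nonempty-prefix sum of the suffix
def minX_alt (arr : List Int) : Int :=
  let best := arr.foldr (fun x best =>
    match best with
    | none => some x
    | some b => some (min x (x + b))) none
  match best with
  | some b => 1 - b
  | none => 0  -- unreachable under Pre_minX (Python raises ValueError here)

-- ===== PRECONDITION & SPEC =====
-- Pre_: both A (min of empty list) and B raise ValueError on the empty list.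
def Pre_minX (arr : List Int) : Prop := arr ≠ []
instance (arr : List Int) : Decidable (Pre_minX arr) := by unfold Pre_minX; infer_instance
def pvWitness_minX : List Int := [3, -1, 2]

def Spec_minX (arr : List Int) (out : Int) : Prop := out = minX_alt arr
instance (arr : List Int) (out : Int) : Decidable (Spec_minX arr out) := by unfold Spec_minX; infer_instance

-- ===== CLAIM (what is proved, stated in full; the proofs are below) =====
def Claim_equal_minX : Prop := ∀ (arr : List Int), Dom_minX arr → Pre_minX arr → Spec_minX arr (minX arr)

-- ===== LEMMAS AND PROOFS =====

-- the prefix-sum list A builds, starting from running total `tot`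
def psums (tot : Int) : List Int → List Int
  | [] => []
  | a :: t => (tot + a) :: psums (tot + a) t

lemma minX_fold_fst (arr : List Int) (tmp : List Int) (tot : Int) :
    (arr.foldl (fun (st : List Int × Int) i =>
      let tot := st.2 + i
      (st.1 ++ [tot], tot)) (tmp, tot)).1 = tmp ++ psums tot arr := by
  induction arr generalizing tmp tot with
  | nil => simp [psums]
  | cons a t ih => simp [psums, ih]

-- min of the shifted prefix-sum list equals tot + (B's foldr recurrence)
lemma min?_psums (arr : List Int) (tot : Int) :
    PySem.List.min? (psums tot arr) (fun x => x) =
      Option.map (fun b => tot + b)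
        (arr.foldr (fun x best =>
          match best with
          | none => some x
          | some b => some (min x (x + b))) none) := by
  induction arr generalizing tot with
  | nil => simp [psums, PySem.List.min?]
  | cons a t ih =>
    have h := ih (tot + a)
    cases ht : t.foldr (fun x best =>
        match best with
        | none => some x
        | some b => some (min x (x + b))) none with
    | none =>
      rw [ht] at h
      cases t with
      | nil => simp [psums, PySem.List.min?]
      | cons y ys =>
        exfalso
        simp only [List.foldr_cons] at ht
        cases hys : ys.foldr (fun x best =>
            match best with
            | none => some x
            | some b => some (min x (x + b))) none <;> simp [hys] at ht
    | some b =>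
      rw [ht] at h
      simp only [Option.map_some] at h
      -- psums tot (a::t) = (tot+a) :: psums (tot+a) t, and that tail is nonempty (t ≠ [])
      cases t with
      | nil => simp at ht
      | cons y ys =>
        have hcons : psums tot (a :: y :: ys) = (tot + a) :: psums (tot + a) (y :: ys) := rfl
        have htail : psums (tot + a) (y :: ys) = (tot + a + y) :: psums (tot + a + y) ys := rfl
        rw [hcons, htail, PySem.List.min?_id_cons]
        have h2 : PySem.List.min? ((tot + a + y) :: psums (tot + a + y) ys) (fun x => x)
            = some (tot + a + b) := by rw [← htail]; exact h
        rw [PySem.List.min?_id_cons] at h2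
        simp only [Option.some.injEq] at h2
        have : List.foldl min (tot + a) ((tot + a + y) :: psums (tot + a + y) ys)
            = min (tot + a) (List.foldl min (tot + a + y) (psums (tot + a + y) ys)) := by
          simp only [List.foldl_cons]
          exact List.foldl_assoc
        rw [this, h2]
        simp only [List.foldr_cons, ht, Option.map_some, Option.some.injEq]
        omega

-- ===== VERDICT (by name: the statement is the Claim_ definition above) =====
theorem minX_spec : Claim_equal_minX := by
  intro arr _ hpre
  unfold Spec_minX minX minX_alt
  dsimp only
  rw [minX_fold_fst, List.nil_append, min?_psums]
  cases harr : arr.foldr (fun x best =>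
      match best with
      | none => some x
      | some b => some (min x (x + b))) none with
  | none =>
    exfalso
    cases arr with
    | nil => exact hpre rfl
    | cons y ys =>
      simp only [List.foldr_cons] at harr
      cases hys : ys.foldr (fun x best =>
          match best with
          | none => some x
          | some b => some (min x (x + b))) none <;> simp [hys] at harr
  | some b => simp
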